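-- pv_equiv track=rewrite | github.com/Rosemarries/OOD-OMG | Day01/test10.py | bon
-- ===== SOURCE A (Python) =====
-- def bon(w):
--     ch = ''
--     for i in range(0, len(w)-1, 1):
--         for j in range(i+1, len(w), 1):
--             if(w[i] == w[j]):
--                 ch = w[i]
--                 break
--     return (ord(ch) - ord('a') + 1) * 4
-- ===== SOURCE B (Python) =====
-- def bon(w):
--     seen = set()
--     ch = ''
--     for c in reversed(w):
--         if c in seen:
--             ch = c
--             break
--         seen.add(c)
--     return (ord(ch) - ord('a') + 1) * 4
-- ===== Notes on version B (the rewrite author's own statement) =====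
-- stated objective: faster
-- what changed: Replaced the quadratic nested index loops (for each i scan all j>i) by a single right-to-left pass with a seen-set: the first character already seen to its right is exactly the one A's loop records last.
import Mathlib
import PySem

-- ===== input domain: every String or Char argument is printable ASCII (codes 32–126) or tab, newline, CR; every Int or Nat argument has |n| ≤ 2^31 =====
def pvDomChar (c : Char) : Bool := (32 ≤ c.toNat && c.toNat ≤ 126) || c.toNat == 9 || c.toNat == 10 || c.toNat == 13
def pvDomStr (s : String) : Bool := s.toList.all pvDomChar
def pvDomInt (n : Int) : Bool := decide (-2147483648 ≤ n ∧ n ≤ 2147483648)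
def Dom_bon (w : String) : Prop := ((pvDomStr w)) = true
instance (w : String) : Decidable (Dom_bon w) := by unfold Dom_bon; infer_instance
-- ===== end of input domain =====

-- B replaces A's quadratic nested index scan by one right-to-left pass with a seen-set (asymptotically faster).


-- ===== PORT A =====
-- ch starts as '' (modelled none); the nested loops record w[i] for every i that has an
-- equal character at some j>i (the inner break after the single assignment makes the inner
-- loop exactly an existence test), so ch ends as the LAST such w[i].
def bonLoopA (cs : List Char) : Option Char :=
  (PySem.List.pyRange 0 ((cs.length : Int) - 1) 1).foldl
    (fun ch i =>
      if (PySem.List.pyRange (i + 1) (cs.length : Int) 1).any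
           (fun j => PySem.List.pyGetD cs i ' ' == PySem.List.pyGetD cs j ' ')
      then some (PySem.List.pyGetD cs i ' ') else ch)
    none

def bon (w : String) : Int :=
  match bonLoopA w.toList with
  | some c => ((c.toNat : Int) - 97 + 1) * 4
  | none => 0   -- Python raises here (ord('')); excluded by Pre_bon

-- ===== PORT B =====
def bonFindB : List Char → PySem.Set Char → Option Char
  | [], _ => none
  | c :: rest, seen =>
      if PySem.Set.contains seen c then some c else bonFindB rest (PySem.Set.add seen c)

def bon_alt (w : String) : Int :=
  match bonFindB w.toList.reverse PySem.Set.empty with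
  | some c => ((c.toNat : Int) - 97 + 1) * 4
  | none => 0   -- Python raises here (ord('')); excluded by Pre_bon

-- ===== PRECONDITION & SPEC =====
-- A raises (ord('') on the never-assigned ch) exactly when no character of w repeats,
-- i.e. when w's characters are pairwise distinct; Pre_ excludes exactly those inputs.
def Pre_bon (w : String) : Prop := ¬ w.toList.Nodup
instance (w : String) : Decidable (Pre_bon w) := by unfold Pre_bon; infer_instance

def pvWitness_bon : String := "abb"

def Spec_bon (w : String) (out : Int) : Prop := out = bon_alt w
instance (w : String) (out : Int) : Decidable (Spec_bon w out) := by unfold Spec_bon; infer_instance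

-- ===== CLAIM (what is proved, stated in full; the proofs are below) =====
def Claim_equal_bon : Prop := ∀ (w : String), Dom_bon w → Pre_bon w → Spec_bon w (bon w)

-- ===== LEMMAS AND PROOFS =====

-- common characterisation: the character at the largest index that reoccurs later
def lastDup : List Char → Option Char
  | [] => none
  | c :: rest =>
      match lastDup rest with
      | some d => some d
      | none => if c ∈ rest then some c else none

def optOr (a b : Option Char) : Option Char :=
  match a with
  | some d => some d
  | none => b

lemma foldl_opt_acc (p : Nat → Bool) (f : Nat → Char) (l : List Nat) (acc : Option Char) :
    l.foldl (fun ch k => if p k then some (f k) else ch) acc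
      = optOr (l.foldl (fun ch k => if p k then some (f k) else ch) none) acc := by
  induction l generalizing acc with
  | nil => simp [optOr]
  | cons k l ih =>
      simp only [List.foldl_cons]
      rw [ih, ih (if p k then some (f k) else none)]
      by_cases h : p k <;> cases l.foldl (fun ch k => if p k then some (f k) else ch) none <;>
        simp [optOr, h]

-- A's loop in Nat-index form
lemma bonLoopA_natfold (cs : List Char) :
    bonLoopA cs
      = (List.range (cs.length - 1)).foldl
          (fun ch k => if (cs.drop (k + 1)).contains (cs.getD k ' ') then some (cs.getD k ' ') else ch)
          none := by
  unfold bonLoopA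
  rw [PySem.List.pyRange_one]
  have hlen : (((cs.length : Int) - 1) - 0).toNat = cs.length - 1 := by omega
  rw [hlen, List.foldl_map]
  apply PySem.List.foldl_congr_mem
  intro acc k hk
  have hk' : k < cs.length - 1 := List.mem_range.mp hk
  have h1 : (0 : Int) + (k : Int) = ((k : Nat) : Int) := by omega
  rw [h1]
  have h2 : ((k : Nat) : Int) + 1 = (((k + 1 : Nat)) : Int) := by omega
  rw [h2]
  have hmap := PySem.List.map_pyGetD_pyRange (xs := cs) (a := ((k + 1 : Nat) : Int)) ' '
    (by positivity)
  have hany : (PySem.List.pyRange ((k + 1 : Nat) : Int) (cs.length : Int) 1).any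
        (fun j => PySem.List.pyGetD cs ((k : Nat) : Int) ' ' == PySem.List.pyGetD cs j ' ')
      = (cs.drop (k + 1)).contains (cs.getD k ' ') := by
    have : (PySem.List.pyRange ((k + 1 : Nat) : Int) (cs.length : Int) 1).any
        (fun j => PySem.List.pyGetD cs ((k : Nat) : Int) ' ' == PySem.List.pyGetD cs j ' ')
      = ((PySem.List.pyRange ((k + 1 : Nat) : Int) (cs.length : Int) 1).map
          (fun j => PySem.List.pyGetD cs j ' ')).any
          (fun x => PySem.List.pyGetD cs ((k : Nat) : Int) ' ' == x) := by
      rw [List.any_map]; rfl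
    rw [this]
    simp only [PySem.List.len_eq] at hmap
    have htoNat : ((k + 1 : Nat) : Int).toNat = k + 1 := by omega
    rw [hmap, htoNat, List.contains_eq_any_beq]
    simp only [PySem.List.pyGetD_natCast]
  rw [hany]
  simp [PySem.List.pyGetD_natCast]

-- the Nat-index fold is lastDup
lemma natfold_eq_lastDup (cs : List Char) :
    (List.range (cs.length - 1)).foldl
        (fun ch k => if (cs.drop (k + 1)).contains (cs.getD k ' ') then some (cs.getD k ' ') else ch)
        none
      = lastDup cs := by
  induction cs with
  | nil => simp [lastDup]
  | cons c cs ih =>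
      cases cs with
      | nil => simp [lastDup]
      | cons c' cs' =>
          set t : List Char := c' :: cs' with ht
          have hlen : (c :: t).length - 1 = (t.length - 1) + 1 := by
            simp [ht]
          rw [hlen, List.range_succ_eq_map, List.foldl_cons, List.foldl_map]
          have hstep : ∀ (acc : Option Char),
              (List.range (t.length - 1)).foldl
                (fun ch k => if ((c :: t).drop (k + 1 + 1)).contains ((c :: t).getD (k + 1) ' ')
                  then some ((c :: t).getD (k + 1) ' ') else ch) acc
              = (List.range (t.length - 1)).foldl
                (fun ch k => if (t.drop (k + 1)).contains (t.getD k ' ')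
                  then some (t.getD k ' ') else ch) acc := by
            intro acc
            apply PySem.List.foldl_congr_mem
            intro a k _
            simp
          rw [hstep]
          rw [foldl_opt_acc (fun k => (t.drop (k + 1)).contains (t.getD k ' '))
                (fun k => t.getD k ' ')]
          rw [ih]
          simp only [lastDup]
          cases h : lastDup t with
          | some d => simp [optOr]
          | none =>
              simp only [optOr, List.getD_cons_zero, List.drop_succ_cons, List.drop_zero]
              by_cases hc : c ∈ t <;> simp [hc]

-- B over an appended element
lemma bonFindB_append (l : List Char) (c : Char) (s : PySem.Set Char) :
    bonFindB (l ++ [c]) s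
      = optOr (bonFindB l s) (if c ∈ s ∨ c ∈ l then some c else none) := by
  induction l generalizing s with
  | nil =>
      by_cases h : c ∈ s <;>
        simp [bonFindB, optOr, h]
  | cons a l ih =>
      by_cases h : a ∈ s
      · simp [bonFindB, h, optOr]
      · have hc : PySem.Set.contains s a = false := by
          simp [h]
        simp only [List.cons_append, bonFindB, hc, if_false, Bool.false_eq_true]
        rw [ih]
        simp [PySem.Set.mem_add, List.mem_cons, or_assoc]

lemma bonFindB_eq_lastDup (cs : List Char) :
    bonFindB cs.reverse PySem.Set.empty = lastDup cs := by
  induction cs with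
  | nil => simp [bonFindB, lastDup]
  | cons c cs ih =>
      rw [List.reverse_cons, bonFindB_append, ih]
      simp only [lastDup]
      cases h : lastDup cs with
      | some d => simp [optOr]
      | none =>
          simp only [optOr]
          by_cases hc : c ∈ cs
          · simp [PySem.Set.empty, hc]
          · simp [PySem.Set.empty, hc]

lemma bon_core_eq (w : String) : bonLoopA w.toList = bonFindB w.toList.reverse PySem.Set.empty := by
  rw [bonLoopA_natfold, natfold_eq_lastDup, bonFindB_eq_lastDup]

-- ===== VERDICT (by name: the statement is the Claim_ definition above) =====
theorem bon_spec : Claim_equal_bon := by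
  intro w _ _
  unfold Spec_bon bon bon_alt
  rw [bon_core_eq]
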